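-- pv_equiv track=rewrite | github.com/LIKELION-INHA-9-ALGORITHM-STUDY/likelion-inha-9-algorithm-study | week-08/손민혁/04/solution.py | solution
-- ===== SOURCE A (Python) =====
-- def solution(drinks, friends):
--     """풀이: 이진 탐색으로 friends에게 나눠 줄 수 있는 최대 용량을 찾는다."""
--     a, b = 1, max(drinks)
--     answer = 0
--     while a <= b:
--         shots = 0  # 막걸리 잔 수
--         m = (a + b) // 2  # 한 잔 당 배분하는 용량(최소와 최댓값의 중앙값 m)
--         for drink in drinks:
--             shots += drink // m
--
--         if shots < friends:  # 친구의 수 만큼 잔이 안나오면 m값을 줄여야 한다.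
--             b = m - 1
--         else:  # 친구의 수 만큼 잔이 나오면 m값을 키워 최댓값을 찾는다.
--             answer = m
--             a = m + 1
--     return answer
-- ===== SOURCE B (Python) =====
-- def solution(drinks, friends):
--     # alternative decomposition: accumulator-free recursive binary search;
--     # the answer is composed on return (`or`), shots via sum() of a genexpr.
--     def go(lo, hi):
--         if lo > hi:
--             return 0
--         m = (lo + hi) // 2
--         if sum(drink // m for drink in drinks) >= friends:
--             return go(m + 1, hi) or m
--         return go(lo, m - 1)
--     return go(1, max(drinks))
-- ===== Notes on version B (the rewrite author's own statement) =====
-- stated objective: alternative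
-- what changed: The while-loop binary search with a mutable `answer` accumulator is replaced by an accumulator-free recursive search whose result is composed on return (`go(m+1,hi) or m`), and the inner shot-counting loop by sum() of a generator expression; same midpoints, so it matches A even where sum(d//m) is not monotone (negative drinks).
import Mathlib
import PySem

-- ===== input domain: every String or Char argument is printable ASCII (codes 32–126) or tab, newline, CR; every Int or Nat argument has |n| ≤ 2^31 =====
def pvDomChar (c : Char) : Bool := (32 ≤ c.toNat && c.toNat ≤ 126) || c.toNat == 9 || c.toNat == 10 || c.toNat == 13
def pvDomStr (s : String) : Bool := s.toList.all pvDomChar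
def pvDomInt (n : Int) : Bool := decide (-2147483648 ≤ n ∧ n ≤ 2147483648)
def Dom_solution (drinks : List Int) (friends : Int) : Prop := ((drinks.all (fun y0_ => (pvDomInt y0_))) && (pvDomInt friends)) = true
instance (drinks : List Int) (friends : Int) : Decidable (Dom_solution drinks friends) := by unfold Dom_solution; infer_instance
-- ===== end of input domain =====

-- B replaces A's while-loop binary search (mutable `answer` accumulator, inner for-loop
-- shot count) by an accumulator-free recursive search composing the answer on return,
-- with shots computed as a sum over a map; objective: alternative decomposition, same cost.


-- ===== PORT A =====
-- the `for drink in drinks: shots += drink // m` accumulation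
def solutionShots (drinks : List Int) (m : Int) : Int :=
  drinks.foldl (fun shots drink => shots + PySem.Int.floordiv drink m) 0

-- the `while a <= b` loop over state (a, b, answer)
def solutionLoop (drinks : List Int) (friends : Int) (a b answer : Int) : Int :=
  if h : a ≤ b then
    let m := PySem.Int.floordiv (a + b) 2
    if solutionShots drinks m < friends then
      solutionLoop drinks friends a (m - 1) answer
    else
      solutionLoop drinks friends (m + 1) b m
  else answer
termination_by (b - a + 1).toNat
decreasing_by
  · have := PySem.Int.floordiv_two_mid_bounds h; omega
  · have := PySem.Int.floordiv_two_mid_bounds h; omega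

def solution (drinks : List Int) (friends : Int) : Int :=
  -- max(drinks) raises on []; that input is outside Pre_solution (getD 0 there)
  solutionLoop drinks friends 1 ((PySem.List.max? drinks (fun x => x)).getD 0) 0

-- ===== PORT B =====
-- recursive `go(lo, hi)`: `go(m+1, hi) or m` ported as its value (r if r ≠ 0 else m)
def solutionGo (drinks : List Int) (friends : Int) (lo hi : Int) : Int :=
  if h : lo > hi then 0
  else
    let m := PySem.Int.floordiv (lo + hi) 2
    if friends ≤ (drinks.map (fun drink => PySem.Int.floordiv drink m)).sum then
      let r := solutionGo drinks friends (m + 1) hi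
      if r ≠ 0 then r else m
    else
      solutionGo drinks friends lo (m - 1)
termination_by (hi - lo + 1).toNat
decreasing_by
  · have := PySem.Int.floordiv_two_mid_bounds (by omega : lo ≤ hi); omega
  · have := PySem.Int.floordiv_two_mid_bounds (by omega : lo ≤ hi); omega

def solution_alt (drinks : List Int) (friends : Int) : Int :=
  solutionGo drinks friends 1 ((PySem.List.max? drinks (fun x => x)).getD 0)

-- ===== PRECONDITION & SPEC =====
-- Pre_ excludes only the empty list, on which Python A's max(drinks) raises ValueError.
def Pre_solution (drinks : List Int) (friends : Int) : Prop := drinks ≠ []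
instance (drinks : List Int) (friends : Int) : Decidable (Pre_solution drinks friends) := by unfold Pre_solution; infer_instance
def pvWitness_solution : List Int × Int := ([4, 2, 7], 3)
def Spec_solution (drinks : List Int) (friends : Int) (out : Int) : Prop := out = solution_alt drinks friends
instance (drinks : List Int) (friends : Int) (out : Int) : Decidable (Spec_solution drinks friends out) := by unfold Spec_solution; infer_instance

-- ===== CLAIM (what is proved, stated in full; the proofs are below) =====
def Claim_equal_solution : Prop := ∀ (drinks : List Int) (friends : Int), Dom_solution drinks friends → Pre_solution drinks friends → Spec_solution drinks friends (solution drinks friends)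

-- ===== LEMMAS AND PROOFS =====

-- A's accumulation loop computes the sum B takes over the mapped list
theorem solutionShots_eq_sum (drinks : List Int) (m : Int) :
    solutionShots drinks m = (drinks.map (fun drink => PySem.Int.floordiv drink m)).sum := by
  unfold solutionShots
  rw [← List.foldl_map, List.sum_eq_foldl]

-- loop/recursion correspondence: for lo ≥ 1 the while loop with accumulator
-- `answer` returns `go lo hi` unless that is 0, in which case it returns `answer`
theorem solutionLoop_eq_go (drinks : List Int) (friends : Int) :
    ∀ lo hi answer : Int, 1 ≤ lo → solutionLoop drinks friends lo hi answer =
      (if solutionGo drinks friends lo hi ≠ 0 then solutionGo drinks friends lo hi else answer) := by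
  intro lo hi answer
  induction lo, hi, answer using solutionLoop.induct drinks friends with
  | case1 lo hi answer hle m hlt ih =>
    intro hlo
    have hmb := PySem.Int.floordiv_two_mid_bounds hle
    rw [solutionLoop, solutionGo, dif_pos hle, dif_neg (by omega : ¬ lo > hi)]
    rw [show PySem.Int.floordiv (lo + hi) 2 = m from rfl]
    rw [if_pos hlt, if_neg (show ¬ friends ≤ (drinks.map (fun drink => PySem.Int.floordiv drink m)).sum by rw [← solutionShots_eq_sum]; omega)]
    exact ih hlo
  | case2 lo hi answer hle m hge ih =>
    intro hlo
    have hmb := PySem.Int.floordiv_two_mid_bounds hle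
    have hm1 : 1 ≤ m := by omega
    rw [solutionLoop, solutionGo, dif_pos hle, dif_neg (by omega : ¬ lo > hi)]
    rw [show PySem.Int.floordiv (lo + hi) 2 = m from rfl]
    rw [if_neg hge, if_pos (show friends ≤ (drinks.map (fun drink => PySem.Int.floordiv drink m)).sum by rw [← solutionShots_eq_sum]; omega)]
    rw [ih (by omega)]
    by_cases h0 : solutionGo drinks friends (m + 1) hi = 0
    · simp only [h0, ne_eq, not_true_eq_false, ite_false]
      rw [if_pos (show m ≠ 0 by omega)]
    · simp only [ne_eq, h0, not_false_eq_true, ite_true]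
  | case3 lo hi answer hgt =>
    intro _
    rw [solutionLoop, solutionGo, dif_neg hgt, dif_pos (by omega : lo > hi)]
    simp

-- ===== VERDICT (by name: the statement is the Claim_ definition above) =====
theorem solution_spec : Claim_equal_solution := by
  intro drinks friends _ _
  unfold Spec_solution solution solution_alt
  rw [solutionLoop_eq_go drinks friends 1 _ 0 (by omega)]
  by_cases h0 : solutionGo drinks friends 1 ((PySem.List.max? drinks (fun x => x)).getD 0) = 0 <;>
    simp [h0]
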